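-- pv_equiv track=rewrite | github.com/Renelvon/codeforces | prob6/A/solve.py | calc_triangle
-- ===== SOURCE A (Python) =====
-- import itertools
--
-- def calc_triangle(lengths):
--     lengths.sort(reverse=True)
--     combs = itertools.combinations(lengths, 3)
--     segment = False
--     for a, b, c in combs:
--         if a < b + c:
--             return 'TRIANGLE'
--         elif a == b + c:
--             segment = True
--     return 'SEGMENT' if segment else 'IMPOSSIBLE'
-- ===== SOURCE B (Python) =====
-- def calc_triangle(lengths):
--     s = sorted(lengths)
--     segment = False
--     for a, b, c in zip(s, s[1:], s[2:]):
--         if a + b > c: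
--             return 'TRIANGLE'
--         if a + b == c:
--             segment = True
--     return 'SEGMENT' if segment else 'IMPOSSIBLE'
-- ===== Notes on version B (the rewrite author's own statement) =====
-- stated objective: alternative
-- what changed: Replaces the scan over all C(n,3) descending-sorted combinations by a single pass over consecutive triples of the ascending sort: a (degenerate) triangle exists among some triple iff it exists among a consecutive sorted triple.
import Mathlib
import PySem

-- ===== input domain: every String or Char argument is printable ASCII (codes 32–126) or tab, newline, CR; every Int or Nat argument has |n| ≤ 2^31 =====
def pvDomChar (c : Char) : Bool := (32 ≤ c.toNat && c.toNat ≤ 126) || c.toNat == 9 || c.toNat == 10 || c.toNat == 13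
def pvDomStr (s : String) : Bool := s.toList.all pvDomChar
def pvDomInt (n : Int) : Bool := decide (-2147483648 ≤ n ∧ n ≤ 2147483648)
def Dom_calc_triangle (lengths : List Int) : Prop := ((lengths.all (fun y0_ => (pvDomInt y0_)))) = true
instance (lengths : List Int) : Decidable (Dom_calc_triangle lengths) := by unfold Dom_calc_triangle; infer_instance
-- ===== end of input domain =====

-- B replaces A's scan of all C(n,3) descending-sorted combinations by a single pass over
-- consecutive triples of the ascending sort (a different algorithm, same return value).
-- Equivalence is about the RETURN value only: Python A sorts its argument in place, B does not.

-- ===== PORT A =====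
-- itertools.combinations(l, 2) as (first, second) pairs, in itertools' lexicographic order
def combs2 : List Int → List (Int × Int)
  | [] => []
  | x :: xs => (xs.map (fun y => (x, y))) ++ combs2 xs

-- itertools.combinations(l, 3), in itertools' lexicographic order
def combs3 : List Int → List (Int × Int × Int)
  | [] => []
  | x :: xs => ((combs2 xs).map (fun p => (x, p.1, p.2))) ++ combs3 xs

-- the 'for a, b, c in combs' loop with the 'segment' flag
def loopA : List (Int × Int × Int) → Bool → String
  | [], seg => if seg then "SEGMENT" else "IMPOSSIBLE"
  | (a, b, c) :: rest, seg =>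
      if a < b + c then "TRIANGLE" else loopA rest (seg || (a == b + c))

def calc_triangle (lengths : List Int) : String :=
  loopA (combs3 (PySem.List.sorted lengths (fun x => x) true)) false

-- ===== PORT B =====
-- the 'for a, b, c in zip(s, s[1:], s[2:])' loop with the 'segment' flag
def loopB : List Int → Bool → String
  | a :: b :: c :: rest, seg =>
      if a + b > c then "TRIANGLE" else loopB (b :: c :: rest) (seg || (a + b == c))
  | _, seg => if seg then "SEGMENT" else "IMPOSSIBLE"

def calc_triangle_alt (lengths : List Int) : String :=
  loopB (PySem.List.sorted lengths (fun x => x) false) false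

-- ===== PRECONDITION & SPEC =====
def Spec_calc_triangle (lengths : List Int) (out : String) : Prop := out = calc_triangle_alt lengths
instance (lengths : List Int) (out : String) : Decidable (Spec_calc_triangle lengths out) := by unfold Spec_calc_triangle; infer_instance

-- ===== CLAIM (what is proved, stated in full; the proofs are below) =====
def Claim_equal_calc_triangle : Prop := ∀ (lengths : List Int), Dom_calc_triangle lengths → Spec_calc_triangle lengths (calc_triangle lengths)

-- ===== LEMMAS AND PROOFS =====

-- consecutive triples of a list (what loopB scans)
def windows : List Int → List (Int × Int × Int)
  | a :: b :: c :: r => (a, b, c) :: windows (b :: c :: r)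
  | _ => []

theorem loopA_char (cs : List (Int × Int × Int)) (seg : Bool) :
    loopA cs seg =
      if cs.any (fun t => decide (t.1 < t.2.1 + t.2.2)) then "TRIANGLE"
      else if seg || cs.any (fun t => t.1 == t.2.1 + t.2.2) then "SEGMENT"
      else "IMPOSSIBLE" := by
  induction cs generalizing seg with
  | nil => simp [loopA]
  | cons t rest ih =>
    obtain ⟨a, b, c⟩ := t
    by_cases h : a < b + c
    · simp [loopA, h]
    · have hd : decide (a < b + c) = false := by simp [h]
      rw [show loopA ((a, b, c) :: rest) seg = loopA rest (seg || (a == b + c)) from by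
        simp [loopA, h]]
      rw [ih]
      simp only [List.any_cons, hd, Bool.false_or, Bool.or_assoc]
      rfl

theorem loopB_char (l : List Int) (seg : Bool) :
    loopB l seg =
      if (windows l).any (fun t => decide (t.1 + t.2.1 > t.2.2)) then "TRIANGLE"
      else if seg || (windows l).any (fun t => t.1 + t.2.1 == t.2.2) then "SEGMENT"
      else "IMPOSSIBLE" := by
  fun_induction loopB with
  | case1 a b c rest seg h => simp [windows, h]
  | case2 a b c rest seg h ih =>
    have hd : decide (a + b > c) = false := by simp [h]
    rw [ih]
    simp only [windows, List.any_cons, hd, Bool.false_or, Bool.or_assoc]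
    rfl
  | case3 t hx =>
    have hw : windows t = [] := by
      match t, hx with
      | [], _ => rfl
      | [a], _ => rfl
      | [a, b], _ => rfl
      | a :: b :: c :: r, hx => exact absurd rfl (hx a b c r)
    simp [hw]
  | case4 t seg h hx =>
    have hw : windows t = [] := by
      match t, hx with
      | [], _ => rfl
      | [a], _ => rfl
      | [a, b], _ => rfl
      | a :: b :: c :: r, hx => exact absurd rfl (hx a b c r)
    simp [hw, h]

theorem mem_combs2 (l : List Int) (p : Int × Int) :
    p ∈ combs2 l ↔ [p.1, p.2].Sublist l := by
  induction l with
  | nil => simp [combs2]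
  | cons x xs ih =>
    simp only [combs2, List.mem_append, List.mem_map, ih, List.sublist_cons_iff]
    constructor
    · rintro (⟨y, hy, rfl⟩ | h)
      · exact Or.inr ⟨[y], rfl, by simpa using hy⟩
      · exact Or.inl h
    · rintro (h | ⟨r, hr, hsub⟩)
      · exact Or.inr h
      · obtain ⟨p1, p2⟩ := p
        simp at hr
        obtain ⟨rfl, rfl⟩ := hr
        exact Or.inl ⟨p2, by simpa using hsub, rfl⟩

theorem mem_combs3 (l : List Int) (t : Int × Int × Int) :
    t ∈ combs3 l ↔ [t.1, t.2.1, t.2.2].Sublist l := by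
  induction l with
  | nil => simp [combs3]
  | cons x xs ih =>
    simp only [combs3, List.mem_append, List.mem_map, ih, List.sublist_cons_iff]
    constructor
    · rintro (⟨p, hp, rfl⟩ | h)
      · exact Or.inr ⟨[p.1, p.2], rfl, (mem_combs2 xs p).mp hp⟩
      · exact Or.inl h
    · rintro (h | ⟨r, hr, hsub⟩)
      · exact Or.inr h
      · obtain ⟨t1, t2, t3⟩ := t
        simp at hr
        obtain ⟨rfl, rfl⟩ := hr
        exact Or.inl ⟨(t2, t3), (mem_combs2 xs (t2, t3)).mpr hsub, rfl⟩

theorem mem_windows_cons (x : Int) (l : List Int) (t : Int × Int × Int)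
    (h : t ∈ windows l) : t ∈ windows (x :: l) := by
  match l with
  | a :: b :: c :: r => exact List.mem_cons_of_mem _ h
  | [] => simp [windows] at h
  | [a] => simp [windows] at h
  | [a, b] => simp [windows] at h

theorem windows_sublist (l : List Int) (t : Int × Int × Int)
    (h : t ∈ windows l) : [t.1, t.2.1, t.2.2].Sublist l := by
  fun_induction windows with
  | case1 a b c r ih =>
    rcases List.mem_cons.mp h with h1 | h1
    · subst h1
      exact (List.cons_sublist_cons).mpr ((List.cons_sublist_cons).mpr
        ((List.cons_sublist_cons).mpr (List.nil_sublist r)))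
    · exact (ih h1).cons a
  | case2 l h' => simp at h

-- W1: a sorted list x :: y :: s'' with some w in s'' has a window dominating (x, y, w)
theorem window_of_mem (s'' : List Int) (x y w : Int)
    (hs : (x :: y :: s'').Pairwise (· ≤ ·)) (hw : w ∈ s'') :
    ∃ t ∈ windows (x :: y :: s''), x ≤ t.1 ∧ y ≤ t.2.1 ∧ t.2.2 ≤ w := by
  induction s'' generalizing x y with
  | nil => simp at hw
  | cons z s''' ih =>
    rcases List.mem_cons.mp hw with rfl | hw'
    · exact ⟨(x, y, w), List.mem_cons_self, le_refl x, le_refl y, le_refl w⟩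
    · have hxy : x ≤ y := (List.pairwise_cons.mp hs).1 y List.mem_cons_self
      have hs' : (y :: z :: s''').Pairwise (· ≤ ·) := (List.pairwise_cons.mp hs).2
      have hyz : y ≤ z := (List.pairwise_cons.mp hs').1 z List.mem_cons_self
      obtain ⟨t, ht, h1, h2, h3⟩ := ih y z hs' hw'
      exact ⟨t, mem_windows_cons x _ t ht, le_trans hxy h1, le_trans hyz h2, h3⟩

-- W2
theorem window_of_sublist2 (s' : List Int) (x v w : Int)
    (hs : (x :: s').Pairwise (· ≤ ·)) (h : [v, w].Sublist s') :
    ∃ t ∈ windows (x :: s'), x ≤ t.1 ∧ v ≤ t.2.1 ∧ t.2.2 ≤ w := by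
  induction s' generalizing x with
  | nil => exact absurd h (by simp)
  | cons y s'' ih =>
    have hxy : x ≤ y := (List.pairwise_cons.mp hs).1 y List.mem_cons_self
    have hs' : (y :: s'').Pairwise (· ≤ ·) := (List.pairwise_cons.mp hs).2
    cases h with
    | cons _ h' =>
      obtain ⟨t, ht, h1, h2, h3⟩ := ih y hs' h'
      exact ⟨t, mem_windows_cons x _ t ht, le_trans hxy h1, h2, h3⟩
    | cons₂ _ h' =>
      have hw : w ∈ s'' := by simpa using h'
      obtain ⟨t, ht, h1, h2, h3⟩ := window_of_mem s'' x v w (by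
        exact List.pairwise_cons.mpr ⟨fun b hb => by
          rcases List.mem_cons.mp hb with rfl | hb'
          · exact hxy
          · exact le_trans hxy ((List.pairwise_cons.mp hs').1 b hb'), hs'⟩) hw
      exact ⟨t, ht, h1, h2, h3⟩

-- W: any 3-element sublist of a sorted list is dominated by a consecutive window
theorem window_of_sublist3 (s : List Int) (u v w : Int)
    (hs : s.Pairwise (· ≤ ·)) (h : [u, v, w].Sublist s) :
    ∃ t ∈ windows s, u ≤ t.1 ∧ v ≤ t.2.1 ∧ t.2.2 ≤ w := by
  induction s with
  | nil => exact absurd h (by simp)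
  | cons x s' ih =>
    have hs' : s'.Pairwise (· ≤ ·) := (List.pairwise_cons.mp hs).2
    cases h with
    | cons _ h' =>
      obtain ⟨t, ht, h1, h2, h3⟩ := ih hs' h'
      exact ⟨t, mem_windows_cons x _ t ht, h1, h2, h3⟩
    | cons₂ _ h' =>
      exact window_of_sublist2 s' u v w hs h'

theorem sorted_rev_eq_reverse (lengths : List Int) :
    PySem.List.sorted lengths (fun x => x) true
      = (PySem.List.sorted lengths (fun x => x) false).reverse := by
  have h1 : (PySem.List.sorted lengths (fun x => x) true).Pairwise (fun a b : Int => b ≤ a) :=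
    PySem.List.sorted_pairwise_rev lengths (fun x => x)
  have h2 : ((PySem.List.sorted lengths (fun x => x) false).reverse).Pairwise (fun a b : Int => b ≤ a) := by
    rw [List.pairwise_reverse]
    exact PySem.List.sorted_pairwise lengths (fun x => x)
  have hp : (PySem.List.sorted lengths (fun x => x) true).Perm
      ((PySem.List.sorted lengths (fun x => x) false).reverse) := by
    refine (PySem.List.sorted_perm lengths (fun x => x) true).trans ?_
    exact ((List.reverse_perm _).trans (PySem.List.sorted_perm lengths (fun x => x) false)).symm
  exact hp.eq_of_pairwise (fun a b _ _ x y => le_antisymm y x) h1 h2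

-- ===== VERDICT (by name: the statement is the Claim_ definition above) =====
theorem calc_triangle_spec : Claim_equal_calc_triangle := by
  intro lengths _
  unfold Spec_calc_triangle calc_triangle calc_triangle_alt
  set s := PySem.List.sorted lengths (fun x => x) false with hsdef
  have hs : s.Pairwise (· ≤ ·) := PySem.List.sorted_pairwise lengths (fun x => x)
  rw [sorted_rev_eq_reverse, loopA_char, loopB_char]
  have key : ∀ (t : Int × Int × Int), t ∈ combs3 s.reverse →
      ∃ t' ∈ windows s, t.2.2 ≤ t'.1 ∧ t.2.1 ≤ t'.2.1 ∧ t'.2.2 ≤ t.1 := by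
    intro t ht
    have hsub : [t.1, t.2.1, t.2.2].Sublist s.reverse := (mem_combs3 _ t).mp ht
    have hsub' : [t.2.2, t.2.1, t.1].Sublist s := by
      have := List.reverse_sublist.mpr hsub
      simpa using this
    exact window_of_sublist3 s _ _ _ hs hsub'
  have back : ∀ (t' : Int × Int × Int), t' ∈ windows s →
      (t'.2.2, t'.2.1, t'.1) ∈ combs3 s.reverse := by
    intro t' ht'
    refine (mem_combs3 _ _).mpr ?_
    have hsub : [t'.1, t'.2.1, t'.2.2].Sublist s := windows_sublist s t' ht'
    have := List.reverse_sublist.mpr hsub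
    simpa using this
  have htri : ((combs3 s.reverse).any (fun t => decide (t.1 < t.2.1 + t.2.2)))
      = ((windows s).any (fun t => decide (t.1 + t.2.1 > t.2.2))) := by
    by_cases hw : ((windows s).any (fun t => decide (t.1 + t.2.1 > t.2.2))) = true
    · rw [hw]
      rw [List.any_eq_true] at hw ⊢
      obtain ⟨t', ht', hpred⟩ := hw
      refine ⟨(t'.2.2, t'.2.1, t'.1), back t' ht', ?_⟩
      simp at hpred ⊢
      omega
    · rw [Bool.not_eq_true] at hw
      rw [hw]
      rw [List.any_eq_false] at hw ⊢
      intro t ht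
      obtain ⟨t', ht', h1, h2, h3⟩ := key t ht
      have := hw t' ht'
      simp at this ⊢
      omega
  rw [htri]
  by_cases hw : ((windows s).any (fun t => decide (t.1 + t.2.1 > t.2.2))) = true
  · simp [hw]
  · rw [Bool.not_eq_true] at hw
    rw [hw]
    have heq : ((combs3 s.reverse).any (fun t => t.1 == t.2.1 + t.2.2))
        = ((windows s).any (fun t => t.1 + t.2.1 == t.2.2)) := by
      rw [List.any_eq_false] at hw
      by_cases hw2 : ((windows s).any (fun t => t.1 + t.2.1 == t.2.2)) = true
      · rw [hw2]
        rw [List.any_eq_true] at hw2 ⊢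
        obtain ⟨t', ht', hpred⟩ := hw2
        refine ⟨(t'.2.2, t'.2.1, t'.1), back t' ht', ?_⟩
        simp at hpred ⊢
        omega
      · rw [Bool.not_eq_true] at hw2
        rw [hw2]
        rw [List.any_eq_false] at hw2 ⊢
        intro t ht
        obtain ⟨t', ht', h1, h2, h3⟩ := key t ht
        have ha := hw t' ht'
        have hb := hw2 t' ht'
        simp at ha hb ⊢
        omega
    rw [heq]
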